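-- pv_equiv track=rewrite | github.com/yanguahe/amdgcn_edit | amdgcn_latency.py | calculate_snop_count
-- ===== SOURCE A (Python) =====
-- from typing import Dict, List, Set, Optional, Tuple, Any, Union
--
-- def calculate_snop_count(nops_needed: int) -> List[int]:
--     """
--     Calculate s_nop instruction(s) needed to achieve the required delay.
--
--     s_nop N waits for N+1 cycles. For MFMA latency hiding, s_nop N is equivalent
--     to N+1 independent instructions. So we should use the minimum number of
--     s_nop instructions to achieve the required delay.
--
--     Examples:
--         - Need 7 cycles: use s_nop 6 (single instruction, 7 cycles)
--         - Need 16 cycles: use s_nop 15 (single instruction, 16 cycles)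
--         - Need 20 cycles: use s_nop 15 + s_nop 3 (two instructions, 16+4=20 cycles)
--
--     Args:
--         nops_needed: Number of cycles/instructions to wait
--
--     Returns:
--         List of s_nop operand values (each value N means s_nop N = N+1 cycles)
--     """
--     if nops_needed <= 0:
--         return []
--
--     result = []
--     remaining = nops_needed
--
--     while remaining > 0:
--         # s_nop N provides N+1 cycles of delay
--         # Maximum operand is 15 (provides 16 cycles)
--         if remaining >= 16:
--             result.append(15)  # s_nop 15 = 16 cycles
--             remaining -= 16
--         else:
--             # Need 'remaining' cycles, use s_nop (remaining-1)
--             result.append(remaining - 1)  # s_nop (remaining-1) = remaining cycles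
--             remaining = 0
--
--     return result
-- ===== SOURCE B (Python) =====
-- def calculate_snop_count(nops_needed: int):
--     if nops_needed <= 0:
--         return []
--     q, r = divmod(nops_needed, 16)
--     return [15] * q + ([r - 1] if r else [])
-- ===== Notes on version B (the rewrite author's own statement) =====
-- stated objective: simpler
-- what changed: Replaced the decrement-by-16 while loop with a closed-form divmod: [15]*q plus the remainder element when nonzero.
import Mathlib
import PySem

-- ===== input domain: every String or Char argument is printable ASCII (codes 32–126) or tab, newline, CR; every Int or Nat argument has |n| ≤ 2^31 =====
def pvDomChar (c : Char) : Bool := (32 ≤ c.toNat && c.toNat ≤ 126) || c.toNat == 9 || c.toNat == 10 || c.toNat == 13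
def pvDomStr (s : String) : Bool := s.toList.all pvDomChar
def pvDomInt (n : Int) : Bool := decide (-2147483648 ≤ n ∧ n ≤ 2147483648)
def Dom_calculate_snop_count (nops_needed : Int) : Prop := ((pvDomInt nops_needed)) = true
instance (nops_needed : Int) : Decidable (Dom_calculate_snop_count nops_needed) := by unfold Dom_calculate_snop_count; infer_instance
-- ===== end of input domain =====

-- B replaces A's decrement-by-16 loop with a closed-form divmod (simpler).

-- ===== PORT A =====
-- the while loop of A: state (remaining, result), appended in order
def snopLoop (remaining : Int) (result : List Int) : List Int :=
  if 0 < remaining then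
    if 16 ≤ remaining then snopLoop (remaining - 16) (result ++ [15])
    else result ++ [remaining - 1]
  else result
termination_by remaining.toNat
decreasing_by
  have : remaining - 16 < remaining := by omega
  omega

def calculate_snop_count (nops_needed : Int) : List Int :=
  if nops_needed ≤ 0 then []
  else snopLoop nops_needed []

-- ===== PORT B =====
def calculate_snop_count_alt (nops_needed : Int) : List Int :=
  if nops_needed ≤ 0 then []
  else
    let q := PySem.Int.floordiv nops_needed 16
    let r := PySem.Int.mod nops_needed 16
    List.replicate q.toNat 15 ++ (if r ≠ 0 then [r - 1] else [])

-- ===== PRECONDITION & SPEC =====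
def Spec_calculate_snop_count (nops_needed : Int) (out : List Int) : Prop := out = calculate_snop_count_alt nops_needed
instance (nops_needed : Int) (out : List Int) : Decidable (Spec_calculate_snop_count nops_needed out) := by unfold Spec_calculate_snop_count; infer_instance

-- ===== CLAIM (what is proved, stated in full; the proofs are below) =====
def Claim_equal_calculate_snop_count : Prop := ∀ (nops_needed : Int), Dom_calculate_snop_count nops_needed → Spec_calculate_snop_count nops_needed (calculate_snop_count nops_needed)

-- ===== LEMMAS AND PROOFS =====

-- loop characterisation: for n ≥ 0 the loop appends (n/16) copies of 15 and,
-- when n % 16 ≠ 0, the element n % 16 - 1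
theorem snopLoop_eq (n : Int) (hn : 0 ≤ n) (acc : List Int) :
    snopLoop n acc =
      acc ++ (List.replicate (n / 16).toNat 15 ++ (if n % 16 ≠ 0 then [n % 16 - 1] else [])) := by
  induction hk : n.toNat using Nat.strong_induction_on generalizing n acc with
  | _ k ih =>
    rw [snopLoop]
    by_cases h0 : 0 < n
    · by_cases h16 : 16 ≤ n
      · simp only [h0, h16, if_true]
        rw [ih (n - 16).toNat (by omega) (n - 16) (by omega) _ rfl]
        have hq : ((n - 16) / 16).toNat + 1 = (n / 16).toNat := by omega
        have hm : (n - 16) % 16 = n % 16 := by omega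
        rw [hm, ← hq, List.replicate_succ]
        simp
      · simp only [h0, h16, if_true, if_false]
        have hq : (n / 16).toNat = 0 := by omega
        have hm : n % 16 = n := by omega
        rw [hq, hm]
        simp [show n ≠ 0 by omega]
    · have hn0 : n = 0 := by omega
      simp [hn0]

-- ===== VERDICT (by name: the statement is the Claim_ definition above) =====
theorem calculate_snop_count_spec : Claim_equal_calculate_snop_count := by
  intro n _
  unfold Spec_calculate_snop_count calculate_snop_count calculate_snop_count_alt
  by_cases h : n ≤ 0
  · simp [h]
  · simp only [h, if_false]
    rw [snopLoop_eq n (by omega) []]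
    rw [List.nil_append]
    have hq : PySem.Int.floordiv n 16 = n / 16 := by
      show n.fdiv 16 = n / 16
      rw [Int.fdiv_eq_ediv]; simp
    have hm : PySem.Int.mod n 16 = n % 16 := by
      show n.fmod 16 = n % 16
      rw [Int.fmod_eq_emod]; simp
    rw [hq, hm]
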